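-- pv_equiv track=rewrite | github.com/BjornRo/advent_of_code | 2023/draft/d21.py | expand_chart
-- ===== SOURCE A (Python) =====
-- def expand_chart(graph):
--     start_row, start_col = next(((i, j) for i, r in enumerate(graph[1:-1]) for j, s in enumerate(r[1:-1]) if s == 2))
--     start_row += len(graph[1:-1])
--     start_col += len(graph[1:-1][0][1:-1])
--     pad = [0]
--     exp_chart = [pad + [int(c >= 1) for c in r[1:-1] * 3] + pad for r in graph[1:-1] * 3]
--     exp_chart = [pad * len(exp_chart[0])] + exp_chart + [pad * len(exp_chart[0])]
--     exp_chart[start_row + 1][start_col + 1] = 2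
--     return exp_chart
-- ===== SOURCE B (Python) =====
-- def expand_chart(graph):
--     inner_rows = graph[1:-1]
--     H = len(inner_rows)
--     W = len(inner_rows[0][1:-1])
--     out = [[0] * (3 * W + 2) for _ in range(3 * H + 2)]
--     start = None
--     for i, row in enumerate(inner_rows):
--         for j, v in enumerate(row[1:-1]):
--             if v >= 1:
--                 for oi in (i + 1, i + 1 + H, i + 1 + 2 * H):
--                     for oj in (j + 1, j + 1 + W, j + 1 + 2 * W):
--                         out[oi][oj] = 1
--             if v == 2 and start is None:
--                 start = (i, j)
--     sr, sc = start
--     out[sr + H + 1][sc + W + 1] = 2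
--     return out
-- ===== Notes on version B (the rewrite author's own statement) =====
-- stated objective: alternative
-- what changed: B replaces A's dense construction by replication and concatenation (rows*3, row-slices*3, pad lists) with a sparse scatter: it preallocates an all-zero (3H+2)x(3W+2) grid and, in one pass over the inner cells, stamps a 1 at the nine tiled positions of every nonzero cell and records the first 2 for the final start write.
import Mathlib
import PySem

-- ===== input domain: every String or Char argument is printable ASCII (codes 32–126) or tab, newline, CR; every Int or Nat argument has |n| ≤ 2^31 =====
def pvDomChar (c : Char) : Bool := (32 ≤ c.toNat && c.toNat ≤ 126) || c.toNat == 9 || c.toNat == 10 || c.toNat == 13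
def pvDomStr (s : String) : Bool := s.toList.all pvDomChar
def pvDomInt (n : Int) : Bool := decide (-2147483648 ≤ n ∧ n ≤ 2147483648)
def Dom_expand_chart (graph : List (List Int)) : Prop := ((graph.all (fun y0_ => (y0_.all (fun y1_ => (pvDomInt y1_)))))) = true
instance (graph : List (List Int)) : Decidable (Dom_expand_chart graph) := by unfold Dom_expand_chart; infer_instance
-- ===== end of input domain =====

-- B builds the tiled padded grid by stamping 1s into a preallocated zero grid (sparse scatter, one pass over inner cells) instead of A's replication and concatenation; proved equal on rectangular grids with a start cell.

-- ===== PORT A =====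
-- the inner generator 'for j, s in enumerate(r[1:-1]) if s == 2'
def pvFindCol : List Int → Nat → Option Nat
  | [], _ => none
  | c :: cs, j => if c = 2 then some j else pvFindCol cs (j + 1)

-- 'next(((i, j) for i, r in enumerate(graph[1:-1]) for j, s in enumerate(r[1:-1]) if s == 2))'
def pvFindStart : List (List Int) → Nat → Option (Nat × Nat)
  | [], _ => none
  | r :: rs, i =>
    match pvFindCol (PySem.List.slice r (some 1) (some (-1))) 0 with
    | some j => some (i, j)
    | none => pvFindStart rs (i + 1)

def expand_chart (graph : List (List Int)) : List (List Int) :=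
  let inner := PySem.List.slice graph (some 1) (some (-1))
  match pvFindStart inner 0 with
  | none => []  -- Python raises StopIteration here: outside Pre_
  | some (i, j) =>
    let start_row := i + inner.length
    match inner with
    | [] => []  -- unreachable (a start was found in some row of inner)
    | r0 :: _ =>
      let start_col := j + (PySem.List.slice r0 (some 1) (some (-1))).length
      let pad : List Int := [0]
      -- [pad + [int(c >= 1) for c in r[1:-1] * 3] + pad for r in graph[1:-1] * 3]
      let exp1 := (inner ++ inner ++ inner).map (fun r =>
        pad ++ ((PySem.List.slice r (some 1) (some (-1)) ++ PySem.List.slice r (some 1) (some (-1)) ++ PySem.List.slice r (some 1) (some (-1))).map (fun c => if 1 ≤ c then (1 : Int) else 0)) ++ pad)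
      match exp1 with
      | [] => []  -- unreachable (inner is nonempty)
      | e0 :: _ =>
        let z := List.replicate e0.length (0 : Int)
        let g := [z] ++ exp1 ++ [z]
        -- exp_chart[start_row + 1][start_col + 1] = 2 (in range on every input satisfying Pre_)
        g.modify (start_row + 1) (fun row => row.set (start_col + 1) 2)

-- ===== PORT B =====
-- 'enumerate(xs)' with a Nat counter (indices here are always the nonnegative positions)
def pvEnum {α : Type} : List α → Nat → List (Nat × α)
  | [], _ => []
  | x :: xs, k => (k, x) :: pvEnum xs (k + 1)

-- the two innermost loops: 'for oi in (…): for oj in (…): out[oi][oj] = 1'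
def pvStampRow (out : List (List Int)) (ois ojs : List Nat) : List (List Int) :=
  ois.foldl (fun o oi => ojs.foldl (fun o oj => o.modify oi (fun r => r.set oj 1)) o) out

-- one iteration of the 'for j, v in enumerate(row[1:-1])' body, state = (out, start)
def pvCellStep (H W i : Nat) (st : List (List Int) × Option (Nat × Nat)) (jv : Nat × Int) :
    List (List Int) × Option (Nat × Nat) :=
  let o := if 1 ≤ jv.2 then
      pvStampRow st.1 [i + 1, i + 1 + H, i + 1 + 2 * H] [jv.1 + 1, jv.1 + 1 + W, jv.1 + 1 + 2 * W]
    else st.1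
  let s := if jv.2 = 2 ∧ st.2 = none then some (i, jv.1) else st.2
  (o, s)

def expand_chart_alt (graph : List (List Int)) : List (List Int) :=
  let innerRows := PySem.List.slice graph (some 1) (some (-1))
  let H := innerRows.length
  match innerRows with
  | [] => []  -- 'inner_rows[0]' raises IndexError here: outside Pre_
  | r0 :: _ =>
    let W := (PySem.List.slice r0 (some 1) (some (-1))).length
    let out0 := List.replicate (3 * H + 2) (List.replicate (3 * W + 2) (0 : Int))
    let res := (pvEnum innerRows 0).foldl
      (fun st ir =>
        (pvEnum (PySem.List.slice ir.2 (some 1) (some (-1))) 0).foldl (pvCellStep H W ir.1) st)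
      (out0, none)
    match res.2 with
    | none => []  -- 'sr, sc = start' raises TypeError on None here: outside Pre_
    | some (sr, sc) => res.1.modify (sr + H + 1) (fun row => row.set (sc + W + 1) 2)

-- ===== PRECONDITION & SPEC =====
-- Pre_ excludes non-rectangular grids (on which A's ragged tiled row lengths and start-write
-- position are accidents of row-by-row replication, and A may also raise IndexError) and grids
-- with no 2 strictly inside the border, on which A raises StopIteration and B TypeError.
def Pre_expand_chart (graph : List (List Int)) : Prop :=
  (∀ r ∈ graph, r.length = (graph.headD []).length) ∧
  (∃ r ∈ PySem.List.slice graph (some 1) (some (-1)), (2:Int) ∈ PySem.List.slice r (some 1) (some (-1)))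
instance (graph : List (List Int)) : Decidable (Pre_expand_chart graph) := by
  unfold Pre_expand_chart; infer_instance

def pvWitness_expand_chart : List (List Int) := [[0, 0, 0], [0, 2, 0], [0, 0, 0]]

def Spec_expand_chart (graph : List (List Int)) (out : List (List Int)) : Prop := out = expand_chart_alt graph
instance (graph : List (List Int)) (out : List (List Int)) : Decidable (Spec_expand_chart graph out) := by unfold Spec_expand_chart; infer_instance

-- ===== CLAIM (what is proved, stated in full; the proofs are below) =====
def Claim_equal_expand_chart : Prop := ∀ (graph : List (List Int)), Dom_expand_chart graph → Pre_expand_chart graph → Spec_expand_chart graph (expand_chart graph)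

-- ===== LEMMAS AND PROOFS =====

-- proof-level reference grid: the gather (per-cell) description both ports are compared with
def pvRef (graph : List (List Int)) : List (List Int) :=
  let g1 := PySem.List.slice graph (some 1) (some (-1))
  let inner := g1.map (fun row =>
    (PySem.List.slice row (some 1) (some (-1))).map (fun c => if 1 ≤ c then (1 : Int) else 0))
  let H := inner.length
  match inner with
  | [] => []
  | row0 :: _ =>
    let W := row0.length
    match pvFindStart g1 0 with
    | none => []
    | some (sr, sc) =>
      let out := (List.range (3 * H + 2)).map (fun i =>
        (List.range (3 * W + 2)).map (fun j =>
          if i = 0 ∨ i = 3 * H + 1 ∨ j = 0 ∨ j = 3 * W + 1 then (0 : Int)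
          else (inner.getD ((i - 1) % H) []).getD ((j - 1) % W) 0))
      out.modify (sr + H + 1) (fun row => row.set (sc + W + 1) 2)

theorem pv_slice11 {α : Type} (xs : List α) :
    PySem.List.slice xs (some 1) (some (-1)) = xs.tail.dropLast := by
  simp [PySem.List.slice, PySem.List.clampIdx]
  rcases xs with _ | ⟨a, t⟩
  · simp
  · simp [List.dropLast_eq_take]

theorem pv_tile {α : Type} (l : List α) (k : Nat) (hk : k < 3 * l.length) :
    (l ++ l ++ l)[k]? = l[k % l.length]? := by
  have hn : 0 < l.length := by omega
  by_cases h1 : k < l.length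
  · rw [List.getElem?_append_left (by simp; omega), List.getElem?_append_left h1,
      Nat.mod_eq_of_lt h1]
  · by_cases h2 : k < 2 * l.length
    · rw [List.getElem?_append_left (by simp; omega), List.getElem?_append_right (by omega),
        Nat.mod_eq_sub_mod (by omega), Nat.mod_eq_of_lt (by omega)]
    · rw [List.getElem?_append_right (by simp; omega),
        Nat.mod_eq_sub_mod (by omega), Nat.mod_eq_sub_mod (by omega), Nat.mod_eq_of_lt (by omega)]
      congr 1
      simp
      omega

theorem pv_row (s : List Int) (W : Nat) (f : Int → Int) (hs : s.length = W) (hW : 0 < W) :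
    ([(0:Int)] ++ ((s ++ s ++ s).map f) ++ [0])
      = (List.range (3 * W + 2)).map (fun j =>
          if j = 0 ∨ j = 3 * W + 1 then (0:Int) else (s.map f).getD ((j - 1) % W) 0) := by
  have hlen : ([(0:Int)] ++ ((s ++ s ++ s).map f)).length = 3 * W + 1 := by simp [hs]; omega
  apply List.ext_getElem?
  intro j
  rw [List.getElem?_map]
  by_cases hj : j < 3 * W + 2
  · rw [List.getElem?_range hj]
    simp only [Option.map_some]
    rcases Nat.eq_zero_or_pos j with rfl | hj1
    · simp
    by_cases hj2 : j = 3 * W + 1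
    · rw [List.getElem?_append_right (by omega), hlen, hj2]
      simp
    · have hmid : j - 1 < 3 * W := by omega
      rw [List.getElem?_append_left (by omega), List.getElem?_append_right (by simp; omega)]
      simp only [List.length_cons, List.length_nil]
      rw [List.map_append, List.map_append]
      rw [pv_tile (s.map f) (j - 1) (by simp [hs]; omega),
        show (List.map f s).length = W by simp [hs]]
      have hin : (j - 1) % W < W := Nat.mod_lt _ hW
      rw [if_neg (by omega : ¬ (j = 0 ∨ j = 3 * W + 1)),
        List.getElem?_eq_getElem (show (j - 1) % W < (List.map f s).length by simp [hs]; omega)]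
      simp
      rw [List.getElem?_eq_getElem (show (j - 1) % W < s.length by omega)]
      simp
  · rw [List.getElem?_eq_none (by simp [hs]; omega), List.getElem?_eq_none (by simp; omega)]
    simp

theorem pvFindCol_eq (l : List Int) (j : Nat) :
    pvFindCol l j = (PySem.List.index? l 2).map (fun k => j + k) := by
  induction l generalizing j with
  | nil => simp [pvFindCol, PySem.List.index?_eq_idxOf?, List.idxOf?]
  | cons c cs ih =>
    by_cases hc : c = 2
    · subst hc
      rw [PySem.List.index?_cons_self]
      simp [pvFindCol]
    · rw [PySem.List.index?_cons_of_ne cs hc]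
      simp only [pvFindCol, if_neg hc, ih]
      cases PySem.List.index? cs 2
      · simp
      · simp; omega

theorem pv_find_isSome (xs : List (List Int)) (i : Nat)
    (h : ∃ r ∈ xs, (2:Int) ∈ PySem.List.slice r (some 1) (some (-1))) :
    (pvFindStart xs i).isSome := by
  induction xs generalizing i with
  | nil => simp at h
  | cons r rs ih =>
    simp only [pvFindStart]
    by_cases hm : (2:Int) ∈ PySem.List.slice r (some 1) (some (-1))
    · obtain ⟨k, hk⟩ := Option.isSome_iff_exists.mp
        ((PySem.List.index?_isSome_iff _ _).mpr hm)
      rw [pvFindCol_eq, hk]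
      rfl
    · have : PySem.List.index? (PySem.List.slice r (some 1) (some (-1))) 2 = none :=
        (PySem.List.index?_eq_none_iff _ _).mpr hm
      rw [pvFindCol_eq, this]
      rcases h with ⟨r', hr', h2⟩
      rcases List.mem_cons.mp hr' with rfl | hr'
      · exact absurd h2 hm
      · exact ih (i+1) ⟨r', hr', h2⟩

theorem pv_grid (g1 : List (List Int)) (W : Nat) (f : Int → Int)
    (hW : ∀ r ∈ g1, r.tail.dropLast.length = W) (hne : g1 ≠ []) (hWpos : 0 < W) :
    ([List.replicate (3*W+2) (0:Int)]
      ++ (g1 ++ g1 ++ g1).map (fun r =>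
            [0] ++ (r.tail.dropLast ++ r.tail.dropLast ++ r.tail.dropLast).map f ++ [0])
      ++ [List.replicate (3*W+2) (0:Int)])
    = (List.range (3*g1.length+2)).map (fun i => (List.range (3*W+2)).map (fun j =>
        if i = 0 ∨ i = 3*g1.length+1 ∨ j = 0 ∨ j = 3*W+1 then (0:Int)
        else ((g1.map (fun row => row.tail.dropLast.map f)).getD ((i-1) % g1.length) []).getD ((j-1) % W) 0)) := by
  have hH : 0 < g1.length := List.length_pos_of_ne_nil hne
  set H := g1.length with hHdef
  have hlen1 : ([List.replicate (3*W+2) (0:Int)]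
      ++ (g1 ++ g1 ++ g1).map (fun r =>
            ([(0:Int)] ++ ((r : List Int).tail.dropLast ++ r.tail.dropLast ++ r.tail.dropLast).map f ++ [0]))).length
      = 3 * H + 1 := by simp; omega
  apply List.ext_getElem?
  intro i
  rw [List.getElem?_map]
  by_cases hi : i < 3 * H + 2
  · rw [List.getElem?_range hi]
    simp only [Option.map_some]
    rcases Nat.eq_zero_or_pos i with rfl | hi1
    · simp
    by_cases hi2 : i = 3 * H + 1
    · rw [List.getElem?_append_right (by omega), hlen1, hi2]
      simp
    · have hmid : i - 1 < 3 * H := by omega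
      rw [List.getElem?_append_left (by omega), List.getElem?_append_right (by simp; omega)]
      simp only [List.length_cons, List.length_nil]
      rw [List.getElem?_map, pv_tile g1 (i - 1) (by omega)]
      have hin : (i - 1) % H < H := Nat.mod_lt _ hH
      rw [List.getElem?_eq_getElem (by omega)]
      simp only [Option.map_some]
      congr 1
      have hmem : g1[(i-1) % H] ∈ g1 := List.getElem_mem _
      have hrow := pv_row (g1[(i-1) % H]).tail.dropLast W f (hW _ hmem) hWpos
      rw [hrow]
      have hgetD : (List.map (fun row => List.map f row.tail.dropLast) g1).getD ((i-1) % H) []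
          = List.map f (g1[(i-1) % H].tail.dropLast) := by
        rw [List.getD_eq_getElem?_getD, List.getElem?_map, List.getElem?_eq_getElem (by omega)]
        simp
      apply List.map_congr_left
      intro j _
      rw [hgetD]
      simp only [eq_false (show ¬ i = 0 by omega), eq_false (show ¬ i = 3 * H + 1 by omega),
        false_or]
  · rw [List.getElem?_eq_none (by simp; omega), List.getElem?_eq_none (by simp; omega)]
    simp

theorem pv_mainA : ∀ graph, Pre_expand_chart graph → expand_chart graph = pvRef graph := by
  intro graph hpre
  obtain ⟨hrect, hex⟩ := hpre
  have hsome := pv_find_isSome (PySem.List.slice graph (some 1) (some (-1))) 0 hex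
  obtain ⟨⟨sr, sc⟩, hfind⟩ := Option.isSome_iff_exists.mp hsome
  obtain ⟨rw2, hrw2, h2w⟩ := hex
  obtain ⟨r0, rest, hcons⟩ : ∃ a l, PySem.List.slice graph (some 1) (some (-1)) = a :: l := by
    rcases h : PySem.List.slice graph (some 1) (some (-1)) with _ | ⟨a, l⟩
    · rw [h] at hrw2; simp at hrw2
    · exact ⟨_, _, rfl⟩
  unfold expand_chart pvRef
  rw [hcons] at hfind
  simp only [hfind, hcons, List.map_cons, List.cons_append, List.length_cons,
    List.length_map]
  congr 1
  have hmemg : ∀ r ∈ (r0 :: rest), r ∈ graph := by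
    intro r hr
    rw [← hcons, pv_slice11] at hr
    exact List.mem_of_mem_tail (List.mem_of_mem_dropLast hr)
  have hW0 : ∀ r ∈ (r0 :: rest), r.tail.dropLast.length = r0.tail.dropLast.length := by
    intro r hr
    have h1 := hrect r (hmemg r hr)
    have h2 := hrect r0 (hmemg r0 (by simp))
    simp [List.length_dropLast, List.length_tail]
    omega
  have hrw2' : rw2 ∈ (r0 :: rest) := by rw [← hcons]; exact hrw2
  have hWpos : 0 < r0.tail.dropLast.length := by
    rw [pv_slice11] at h2w
    have := List.length_pos_of_mem h2w
    rw [hW0 rw2 hrw2'] at this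
    exact this
  have hgrid := pv_grid (r0 :: rest) (r0.tail.dropLast.length)
    (fun c => if 1 ≤ c then (1:Int) else 0) hW0 (by simp) hWpos
  simp only [List.map_cons, List.cons_append, List.length_cons,
    ← pv_slice11] at hgrid
  simp only [List.length_append, List.length_map, List.length_nil, List.length_cons] at hgrid ⊢
  ring_nf at hgrid ⊢
  exact hgrid


-- ---------- B-side: scatter fold = gather grid ----------

-- generic: a fold whose step acts componentwise on a pair splits into two folds
theorem pv_foldl_pair {A B C : Type} (step : B × C → A → B × C) (f : B → A → B) (g : C → A → C)
    (h : ∀ st x, step st x = (f st.1 x, g st.2 x)) : ∀ (l : List A) (o : B) (s : C),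
    l.foldl step (o, s) = (l.foldl f o, l.foldl g s) := by
  intro l
  induction l with
  | nil => intro o s; rfl
  | cons x xs ih =>
    intro o s
    simp only [List.foldl_cons, h (o, s) x]
    exact ih _ _

theorem pv_foldl_flatMap {A B C : Type} (l : List A) (g : A → List C) (f : B → C → B) (b : B) :
    (l.flatMap g).foldl f b = l.foldl (fun acc x => (g x).foldl f acc) b := by
  induction l generalizing b with
  | nil => rfl
  | cons x xs ih => simp [List.foldl_append, ih]

def pvWrite (g : List (List Int)) (p : Nat × Nat) : List (List Int) :=
  g.modify p.1 (fun r => r.set p.2 1)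

def pvGetCell (g : List (List Int)) (i j : Nat) : Option Int :=
  g[i]?.bind (fun r => r[j]?)

-- the 9 stamped positions of one nonzero inner cell (empty for a zero cell)
def pvCellPos (H W i : Nat) (jv : Nat × Int) : List (Nat × Nat) :=
  if 1 ≤ jv.2 then
    [(i + 1, jv.1 + 1), (i + 1, jv.1 + 1 + W), (i + 1, jv.1 + 1 + 2 * W),
     (i + 1 + H, jv.1 + 1), (i + 1 + H, jv.1 + 1 + W), (i + 1 + H, jv.1 + 1 + 2 * W),
     (i + 1 + 2 * H, jv.1 + 1), (i + 1 + 2 * H, jv.1 + 1 + W), (i + 1 + 2 * H, jv.1 + 1 + 2 * W)]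
  else []

def pvBigPos (H W : Nat) (g1 : List (List Int)) : List (Nat × Nat) :=
  (pvEnum g1 0).flatMap (fun ir =>
    (pvEnum (PySem.List.slice ir.2 (some 1) (some (-1))) 0).flatMap (pvCellPos H W ir.1))

theorem pv_cellstep_eq (H W i : Nat) (st : List (List Int) × Option (Nat × Nat)) (jv : Nat × Int) :
    pvCellStep H W i st jv
      = ((pvCellPos H W i jv).foldl pvWrite st.1,
         if jv.2 = 2 ∧ st.2 = none then some (i, jv.1) else st.2) := by
  by_cases h : 1 ≤ jv.2 <;>
    simp [pvCellStep, pvCellPos, pvStampRow, pvWrite, h, List.foldl]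

theorem pv_write_length (g : List (List Int)) (p : Nat × Nat) :
    (pvWrite g p).length = g.length := by
  simp [pvWrite]

theorem pv_write_rows (g : List (List Int)) (Wt : Nat) (hw : ∀ r ∈ g, r.length = Wt)
    (p : Nat × Nat) : ∀ r ∈ pvWrite g p, r.length = Wt := by
  intro r hr
  obtain ⟨i, hlt, hget⟩ := List.mem_iff_getElem.mp hr
  have hi : (pvWrite g p)[i]? = some r := by rw [List.getElem?_eq_getElem hlt, hget]
  rw [pvWrite, List.getElem?_modify] at hi
  cases hg : g[i]? with
  | none => rw [hg] at hi; simp at hi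
  | some row =>
    rw [hg] at hi
    have hrow : row ∈ g := List.mem_of_getElem? hg
    simp only [Option.map_eq_map, Option.map_some, Option.some.injEq] at hi
    by_cases hp : p.1 = i
    · rw [if_pos hp] at hi
      rw [← hi, List.length_set]
      exact hw row hrow
    · rw [if_neg hp] at hi
      rw [← hi]
      exact hw row hrow

theorem pv_write_cell (g : List (List Int)) (Wt : Nat) (hw : ∀ r ∈ g, r.length = Wt)
    (p : Nat × Nat) (i j : Nat) :
    pvGetCell (pvWrite g p) i j
      = if p.1 = i ∧ p.2 = j ∧ i < g.length ∧ j < Wt then some 1 else pvGetCell g i j := by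
  unfold pvGetCell pvWrite
  rw [List.getElem?_modify]
  simp only [Option.map_eq_map]
  by_cases hi : i < g.length
  · rw [List.getElem?_eq_getElem hi]
    have hlen : g[i].length = Wt := hw _ (List.getElem_mem hi)
    by_cases hp : p.1 = i
    · simp only [Option.map_some, if_pos hp, Option.bind_some]
      rw [List.getElem?_set]
      by_cases hq : p.2 = j
      · rw [if_pos hq, hlen]
        by_cases hj : j < Wt
        · rw [if_pos (by omega : p.2 < Wt), if_pos ⟨hp, hq, hi, hj⟩]
        · rw [if_neg (by omega : ¬ p.2 < Wt), if_neg (by tauto),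
            List.getElem?_eq_none (by omega)]
      · rw [if_neg hq, if_neg (by tauto)]
    · simp only [Option.map_some, if_neg hp, Option.bind_some]
      rw [if_neg (by tauto)]
  · rw [List.getElem?_eq_none (by omega)]
    simp only [Option.map_none, Option.bind_none]
    rw [if_neg (by tauto)]

theorem pv_writeAll_length (ps : List (Nat × Nat)) (g : List (List Int)) :
    (ps.foldl pvWrite g).length = g.length := by
  induction ps generalizing g with
  | nil => rfl
  | cons p ps ih => rw [List.foldl_cons, ih, pv_write_length]

theorem pv_writeAll_cell (ps : List (Nat × Nat)) (g : List (List Int)) (Wt : Nat)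
    (hw : ∀ r ∈ g, r.length = Wt) (i j : Nat) :
    pvGetCell (ps.foldl pvWrite g) i j
      = if (i, j) ∈ ps ∧ i < g.length ∧ j < Wt then some 1 else pvGetCell g i j := by
  induction ps generalizing g with
  | nil => simp
  | cons p ps ih =>
    rw [List.foldl_cons, ih _ (pv_write_rows g Wt hw p), pv_write_length,
      pv_write_cell g Wt hw p i j]
    have hpe : ((i, j) = p) ↔ (p.1 = i ∧ p.2 = j) := by
      cases p; simp [Prod.ext_iff, eq_comm]
    simp only [List.mem_cons, hpe]
    split_ifs <;> first | rfl | tauto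

theorem pv_mem_enum {A : Type} (l : List A) (k : Nat) (p : Nat × A) :
    p ∈ pvEnum l k ↔ ∃ t, ∃ _ : t < l.length, p = (k + t, l[t]) := by
  induction l generalizing k with
  | nil => simp [pvEnum]
  | cons x xs ih =>
    simp only [pvEnum, List.mem_cons, ih]
    constructor
    · rintro (rfl | ⟨t, ht, rfl⟩)
      · exact ⟨0, by simp, by simp⟩
      · exact ⟨t + 1, by simpa using ht, by simp; omega⟩
    · rintro ⟨t, ht, rfl⟩
      cases t with
      | zero => left; simp
      | succ t => right; exact ⟨t, by simpa using ht, by simp; omega⟩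

-- the start-tracking fold: keeps the first (row, col) with value 2, scan order = A's generator
theorem pv_inner_keep (cells : List Int) (k i : Nat) (p : Nat × Nat) :
    (pvEnum cells k).foldl
      (fun s jv => if jv.2 = 2 ∧ s = none then some (i, jv.1) else s) (some p) = some p := by
  induction cells generalizing k with
  | nil => rfl
  | cons c cs ih => simp [pvEnum, ih]

theorem pv_inner_none (cells : List Int) (k i : Nat) :
    (pvEnum cells k).foldl
      (fun s jv => if jv.2 = 2 ∧ s = none then some (i, jv.1) else s) none
      = (pvFindCol cells k).map (fun j => (i, j)) := by
  induction cells generalizing k with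
  | nil => rfl
  | cons c cs ih =>
    by_cases hc : c = 2
    · simp [pvEnum, pvFindCol, hc, pv_inner_keep]
    · simp [pvEnum, pvFindCol, hc, ih]

theorem pv_outer_keep (rows : List (List Int)) (k : Nat) (p : Nat × Nat) :
    (pvEnum rows k).foldl
      (fun s ir => (pvEnum (PySem.List.slice ir.2 (some 1) (some (-1))) 0).foldl
        (fun s jv => if jv.2 = 2 ∧ s = none then some (ir.1, jv.1) else s) s) (some p) = some p := by
  induction rows generalizing k with
  | nil => rfl
  | cons r rs ih => simp [pvEnum, pv_inner_keep, ih]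

theorem pv_startfold (rows : List (List Int)) (k : Nat) :
    (pvEnum rows k).foldl
      (fun s ir => (pvEnum (PySem.List.slice ir.2 (some 1) (some (-1))) 0).foldl
        (fun s jv => if jv.2 = 2 ∧ s = none then some (ir.1, jv.1) else s) s) none
      = pvFindStart rows k := by
  induction rows generalizing k with
  | nil => rfl
  | cons r rs ih =>
    simp only [pvEnum, List.foldl_cons, pvFindStart, pv_inner_none]
    cases pvFindCol (PySem.List.slice r (some 1) (some (-1))) 0 with
    | none => exact ih (k + 1)
    | some j => simp [pv_outer_keep]

theorem pv_mem_bigPos (g1 : List (List Int)) (W : Nat)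
    (hW : ∀ r ∈ g1, (PySem.List.slice r (some 1) (some (-1))).length = W) (i j : Nat) :
    (i, j) ∈ pvBigPos g1.length W g1
      ↔ ∃ a b ii jj, a < 3 ∧ b < 3 ∧ ∃ hii : ii < g1.length, jj < W ∧
          i = ii + 1 + a * g1.length ∧ j = jj + 1 + b * W ∧
          1 ≤ (PySem.List.slice g1[ii] (some 1) (some (-1))).getD jj 0 := by
  unfold pvBigPos
  simp only [List.mem_flatMap]
  constructor
  · rintro ⟨ir, hir, jv, hjv, hmem⟩
    obtain ⟨ii, hii, rfl⟩ := (pv_mem_enum _ _ _).mp hir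
    simp only [Nat.zero_add] at hjv hmem ⊢
    obtain ⟨jj, hjj, rfl⟩ := (pv_mem_enum _ _ _).mp hjv
    simp only [Nat.zero_add] at hmem
    have hjj' : jj < W := by rw [← hW g1[ii] (List.getElem_mem hii)]; exact hjj
    unfold pvCellPos at hmem
    by_cases hv : 1 ≤ (PySem.List.slice g1[ii] (some 1) (some (-1)))[jj]
    · rw [if_pos hv] at hmem
      have hval : (PySem.List.slice g1[ii] (some 1) (some (-1))).getD jj 0
          = (PySem.List.slice g1[ii] (some 1) (some (-1)))[jj] := List.getD_eq_getElem _ _ hjj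
      simp only [List.mem_cons, List.not_mem_nil, or_false, Prod.mk.injEq] at hmem
      rcases hmem with ⟨h1, h2⟩|⟨h1, h2⟩|⟨h1, h2⟩|⟨h1, h2⟩|⟨h1, h2⟩|⟨h1, h2⟩|⟨h1, h2⟩|⟨h1, h2⟩|⟨h1, h2⟩
      · exact ⟨0, 0, ii, jj, by omega, by omega, hii, hjj', by omega, by omega, by rw [hval]; exact hv⟩
      · exact ⟨0, 1, ii, jj, by omega, by omega, hii, hjj', by omega, by omega, by rw [hval]; exact hv⟩
      · exact ⟨0, 2, ii, jj, by omega, by omega, hii, hjj', by omega, by omega, by rw [hval]; exact hv⟩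
      · exact ⟨1, 0, ii, jj, by omega, by omega, hii, hjj', by omega, by omega, by rw [hval]; exact hv⟩
      · exact ⟨1, 1, ii, jj, by omega, by omega, hii, hjj', by omega, by omega, by rw [hval]; exact hv⟩
      · exact ⟨1, 2, ii, jj, by omega, by omega, hii, hjj', by omega, by omega, by rw [hval]; exact hv⟩
      · exact ⟨2, 0, ii, jj, by omega, by omega, hii, hjj', by omega, by omega, by rw [hval]; exact hv⟩
      · exact ⟨2, 1, ii, jj, by omega, by omega, hii, hjj', by omega, by omega, by rw [hval]; exact hv⟩
      · exact ⟨2, 2, ii, jj, by omega, by omega, hii, hjj', by omega, by omega, by rw [hval]; exact hv⟩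
    · rw [if_neg hv] at hmem
      simp at hmem
  · rintro ⟨a, b, ii, jj, ha, hb, hii, hjj, rfl, rfl, hv⟩
    have hjj2 : jj < (PySem.List.slice g1[ii] (some 1) (some (-1))).length := by
      rw [hW g1[ii] (List.getElem_mem hii)]; exact hjj
    refine ⟨(ii, g1[ii]), (pv_mem_enum _ _ _).mpr ⟨ii, hii, by simp⟩,
      (jj, (PySem.List.slice g1[ii] (some 1) (some (-1)))[jj]),
      (pv_mem_enum _ _ _).mpr ⟨jj, hjj2, by simp⟩, ?_⟩
    rw [List.getD_eq_getElem _ _ hjj2] at hv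
    unfold pvCellPos
    rw [if_pos hv]
    simp only [List.mem_cons, Prod.mk.injEq]
    interval_cases a <;> interval_cases b <;> simp <;> omega

theorem pv_grid_ext (g1 g2 : List (List Int)) (hl : g1.length = g2.length)
    (hc : ∀ i j, pvGetCell g1 i j = pvGetCell g2 i j) : g1 = g2 := by
  apply List.ext_getElem?
  intro i
  by_cases hi : i < g1.length
  · rw [List.getElem?_eq_getElem hi, List.getElem?_eq_getElem (by omega : i < g2.length)]
    congr 1
    apply List.ext_getElem?
    intro j
    have h := hc i j
    unfold pvGetCell at h
    rw [List.getElem?_eq_getElem hi, List.getElem?_eq_getElem (by omega : i < g2.length)] at h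
    simpa using h
  · rw [List.getElem?_eq_none (by omega), List.getElem?_eq_none (by omega)]

theorem pv_scatter_eq_gather (g1 : List (List Int)) (W : Nat)
    (hW : ∀ r ∈ g1, (PySem.List.slice r (some 1) (some (-1))).length = W)
    (hH : 0 < g1.length) (hWpos : 0 < W) :
    (pvBigPos g1.length W g1).foldl pvWrite
        (List.replicate (3 * g1.length + 2) (List.replicate (3 * W + 2) (0 : Int)))
      = (List.range (3 * g1.length + 2)).map (fun i => (List.range (3 * W + 2)).map (fun j =>
          if i = 0 ∨ i = 3 * g1.length + 1 ∨ j = 0 ∨ j = 3 * W + 1 then (0 : Int)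
          else ((g1.map (fun row =>
              (PySem.List.slice row (some 1) (some (-1))).map (fun c => if 1 ≤ c then (1:Int) else 0))).getD
                ((i - 1) % g1.length) []).getD ((j - 1) % W) 0)) := by
  set H := g1.length with hHdef
  set base := List.replicate (3 * H + 2) (List.replicate (3 * W + 2) (0 : Int)) with hbase
  have hwrows : ∀ r ∈ base, r.length = 3 * W + 2 := by
    intro r hr
    rw [List.eq_of_mem_replicate hr, List.length_replicate]
  have hbcell : ∀ i j, (base[i]?.bind fun r => r[j]?)
      = if i < 3 * H + 2 ∧ j < 3 * W + 2 then some 0 else none := by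
    intro i j
    rw [hbase, List.getElem?_replicate]
    by_cases hi : i < 3 * H + 2
    · rw [if_pos hi]
      simp only [Option.bind_some]
      rw [List.getElem?_replicate]
      by_cases hj : j < 3 * W + 2
      · rw [if_pos hj, if_pos ⟨hi, hj⟩]
      · rw [if_neg hj, if_neg (by tauto)]
    · rw [if_neg hi, if_neg (by tauto)]
      rfl
  apply pv_grid_ext
  · rw [pv_writeAll_length, hbase]
    simp
  · intro i j
    have hblen : base.length = 3 * H + 2 := by rw [hbase, List.length_replicate]
    rw [pv_writeAll_cell _ _ (3 * W + 2) hwrows]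
    unfold pvGetCell
    rw [List.getElem?_map, hblen]
    by_cases hi : i < 3 * H + 2
    · rw [List.getElem?_range hi]
      simp only [Option.map_some, Option.bind_some]
      rw [List.getElem?_map]
      by_cases hj : j < 3 * W + 2
      · rw [List.getElem?_range hj]
        simp only [Option.map_some]
        rw [hbcell, if_pos (show i < 3 * H + 2 ∧ j < 3 * W + 2 from ⟨hi, hj⟩)]
        by_cases hborder : i = 0 ∨ i = 3 * H + 1 ∨ j = 0 ∨ j = 3 * W + 1
        · rw [if_neg ?noMem, if_pos hborder]
          case noMem =>
            rintro ⟨hmem, -⟩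
            obtain ⟨a, b, ii, jj, ha, hb, hii, hjj, rfl, rfl, -⟩ :=
              (pv_mem_bigPos g1 W hW _ _).mp hmem
            rw [← hHdef] at hii hborder
            interval_cases a <;> interval_cases b <;> omega
        · push_neg at hborder
          obtain ⟨hi0, hi1, hj0, hj1⟩ := hborder
          rw [if_neg (by omega : ¬ (i = 0 ∨ i = 3 * H + 1 ∨ j = 0 ∨ j = 3 * W + 1))]
          set ii := (i - 1) % H with hiidef
          set jj := (j - 1) % W with hjjdef
          have hiiH : ii < H := Nat.mod_lt _ hH
          have hjjW : jj < W := Nat.mod_lt _ hWpos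
          have h1 : (g1.map (fun row =>
                (PySem.List.slice row (some 1) (some (-1))).map (fun c => if 1 ≤ c then (1:Int) else 0))).getD ii []
              = (PySem.List.slice (g1[ii]'hiiH) (some 1) (some (-1))).map (fun c => if 1 ≤ c then (1:Int) else 0) := by
            rw [List.getD_eq_getElem?_getD, List.getElem?_map, List.getElem?_eq_getElem hiiH]
            rfl
          have hjj2 : jj < (PySem.List.slice (g1[ii]'hiiH) (some 1) (some (-1))).length := by
            rw [hW _ (List.getElem_mem hiiH)]; exact hjjW
          have hval : ((g1.map (fun row =>
                (PySem.List.slice row (some 1) (some (-1))).map (fun c => if 1 ≤ c then (1:Int) else 0))).getD ii []).getD jj 0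
              = (if 1 ≤ (PySem.List.slice (g1[ii]'hiiH) (some 1) (some (-1))).getD jj 0 then (1:Int) else 0) := by
            rw [h1, List.getD_eq_getElem _ _ (by simpa using hjj2), List.getElem_map,
              List.getD_eq_getElem _ _ hjj2]
          rw [hval]
          have hmemiff : (i, j) ∈ pvBigPos H W g1
              ↔ 1 ≤ (PySem.List.slice (g1[ii]'hiiH) (some 1) (some (-1))).getD jj 0 := by
            rw [pv_mem_bigPos g1 W hW]
            constructor
            · rintro ⟨a, b, ii', jj', ha, hb, hii', hjj', hieq, hjeq, hv⟩
              have hiieq : ii = ii' := by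
                rw [hiidef, hieq, show ii' + 1 + a * H - 1 = ii' + a * H by omega,
                  Nat.add_mul_mod_self_right, Nat.mod_eq_of_lt hii']
              have hjjeq : jj = jj' := by
                rw [hjjdef, hjeq, show jj' + 1 + b * W - 1 = jj' + b * W by omega,
                  Nat.add_mul_mod_self_right, Nat.mod_eq_of_lt hjj']
              subst hiieq
              subst hjjeq
              exact hv
            · intro hv
              refine ⟨(i - 1) / H, (j - 1) / W, ii, jj, ?_, ?_, hiiH, hjjW, ?_, ?_, hv⟩
              · exact (Nat.div_lt_iff_lt_mul hH).mpr (by omega)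
              · exact (Nat.div_lt_iff_lt_mul hWpos).mpr (by omega)
              · rw [← hHdef, Nat.mul_comm]
                have := Nat.div_add_mod (i - 1) H
                omega
              · rw [Nat.mul_comm]
                have := Nat.div_add_mod (j - 1) W
                omega
          by_cases hmem : (i, j) ∈ pvBigPos H W g1
          · rw [if_pos (show (i, j) ∈ pvBigPos H W g1 ∧ i < 3 * H + 2 ∧ j < 3 * W + 2 from
              ⟨hmem, hi, hj⟩), if_pos (hmemiff.mp hmem)]
          · rw [if_neg (fun hc => hmem hc.1),
              if_neg (fun hc => hmem (hmemiff.mpr hc))]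
      · rw [if_neg (fun hc => hj hc.2.2), hbcell, if_neg (fun hc => hj hc.2),
          List.getElem?_eq_none
            (show (List.range (3 * W + 2)).length ≤ j by rw [List.length_range]; omega)]
        rfl
    · rw [if_neg (fun hc => hi hc.2.1), hbcell, if_neg (fun hc => hi hc.1),
        List.getElem?_eq_none
          (show (List.range (3 * H + 2)).length ≤ i by rw [List.length_range]; omega)]
      rfl

theorem pv_mainB : ∀ graph, Pre_expand_chart graph → expand_chart_alt graph = pvRef graph := by
  intro graph hpre
  obtain ⟨hrect, hex⟩ := hpre
  have hsome := pv_find_isSome (PySem.List.slice graph (some 1) (some (-1))) 0 hex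
  obtain ⟨⟨sr, sc⟩, hfind⟩ := Option.isSome_iff_exists.mp hsome
  obtain ⟨rw2, hrw2, h2w⟩ := hex
  obtain ⟨r0, rest, hcons⟩ : ∃ a l, PySem.List.slice graph (some 1) (some (-1)) = a :: l := by
    rcases h : PySem.List.slice graph (some 1) (some (-1)) with _ | ⟨a, l⟩
    · rw [h] at hrw2; simp at hrw2
    · exact ⟨_, _, rfl⟩
  set g1 := PySem.List.slice graph (some 1) (some (-1)) with hg1
  have hmemg : ∀ r ∈ g1, r ∈ graph := by
    intro r hr
    rw [hg1, pv_slice11] at hr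
    exact List.mem_of_mem_tail (List.mem_of_mem_dropLast hr)
  set W := (PySem.List.slice r0 (some 1) (some (-1))).length with hWdef
  have hW : ∀ r ∈ g1, (PySem.List.slice r (some 1) (some (-1))).length = W := by
    intro r hr
    have h1 := hrect r (hmemg r hr)
    have h2 := hrect r0 (hmemg r0 (by rw [hcons]; simp))
    rw [pv_slice11, hWdef, pv_slice11]
    simp [List.length_dropLast, List.length_tail]
    omega
  have hWpos : 0 < W := by
    rw [← hW rw2 hrw2]
    exact List.length_pos_of_mem h2w
  have hH : 0 < g1.length := by rw [hcons]; simp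
  -- unfold B
  unfold expand_chart_alt
  rw [← hg1, hcons]
  simp only
  rw [← hcons, ← hWdef]
  -- the double fold splits into the stamp fold and the start fold
  have hsplit : (pvEnum g1 0).foldl
      (fun st ir =>
        (pvEnum (PySem.List.slice ir.2 (some 1) (some (-1))) 0).foldl (pvCellStep g1.length W ir.1) st)
      (List.replicate (3 * g1.length + 2) (List.replicate (3 * W + 2) (0 : Int)), none)
      = ((pvBigPos g1.length W g1).foldl pvWrite
          (List.replicate (3 * g1.length + 2) (List.replicate (3 * W + 2) (0 : Int))),
         pvFindStart g1 0) := by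
    rw [pv_foldl_pair _
      (fun o ir => ((pvEnum (PySem.List.slice ir.2 (some 1) (some (-1))) 0).flatMap (pvCellPos g1.length W ir.1)).foldl pvWrite o)
      (fun s ir => (pvEnum (PySem.List.slice ir.2 (some 1) (some (-1))) 0).foldl
        (fun s jv => if jv.2 = 2 ∧ s = none then some (ir.1, jv.1) else s) s)
      ?hstep]
    case hstep =>
      intro st x
      obtain ⟨o, s⟩ := st
      rw [pv_foldl_pair (pvCellStep g1.length W x.1)
        (fun o jv => (pvCellPos g1.length W x.1 jv).foldl pvWrite o)
        (fun s jv => if jv.2 = 2 ∧ s = none then some (x.1, jv.1) else s)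
        (fun st jv => pv_cellstep_eq g1.length W x.1 st jv)]
      simp only [pv_foldl_flatMap]
    rw [pv_startfold]
    congr 1
    simp only [pvBigPos, pv_foldl_flatMap]
  rw [hsplit]
  simp only [hfind]
  -- unfold pvRef and reduce its matches
  unfold pvRef
  rw [← hg1, hcons]
  rw [hcons] at hfind
  simp only [List.map_cons, hfind]
  have hgrid := pv_scatter_eq_gather g1 W hW hH hWpos
  rw [hcons] at hgrid
  simp only [List.map_cons, List.length_cons, List.length_map] at hgrid ⊢
  simp only [← hWdef]
  rw [hgrid]

-- ===== VERDICT (by name: the statement is the Claim_ definition above) =====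
theorem expand_chart_spec : Claim_equal_expand_chart := by
  intro g _ hpre
  unfold Spec_expand_chart
  rw [pv_mainA g hpre, pv_mainB g hpre]
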